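-- pv_equiv track=rewrite | github.com/leothelyon17/nerdy-k8s-volume-manager | src/nerdy_k8s_volume_manager/k8s.py | _select_owner
-- ===== SOURCE A (Python) =====
-- UNKNOWN_OWNER_KIND = "Unknown"
--
-- UNKNOWN_OWNER_NAME = "Unknown"
--
-- def _select_owner(owners: list[tuple[str, str]]) -> tuple[str | None, str | None]:
--     if not owners:
--         return UNKNOWN_OWNER_KIND, UNKNOWN_OWNER_NAME
--
--     normalized_owners = sorted(
--         {
--             (
--                 kind or UNKNOWN_OWNER_KIND,
--                 name or UNKNOWN_OWNER_NAME,
--             )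
--             for kind, name in owners
--         }
--     )
--     if len(normalized_owners) == 1:
--         return normalized_owners[0]
--
--     kinds = sorted({kind for kind, _ in normalized_owners})
--     unique_names = sorted({name for _, name in normalized_owners})
--     names = ", ".join(unique_names[:3])
--     if len(unique_names) > 3:
--         names = f"{names}, ..."
--     return f"Multiple[{','.join(kinds)}]", names
-- ===== SOURCE B (Python) =====
-- UNKNOWN_OWNER_KIND = "Unknown"
--
-- UNKNOWN_OWNER_NAME = "Unknown"
--
--
-- def _insert_unique(xs, x):
--     # keep xs sorted and duplicate-free by ordered insertion
--     for i, v in enumerate(xs):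
--         if x == v:
--             return
--         if x < v:
--             xs.insert(i, x)
--             return
--     xs.append(x)
--
--
-- def _select_owner(owners):
--     if not owners:
--         return UNKNOWN_OWNER_KIND, UNKNOWN_OWNER_NAME
--     # single pass: maintain two sorted duplicate-free lists by ordered insertion
--     # (no set(), no sorted() anywhere)
--     kinds = []
--     names = []
--     for kind, name in owners:
--         _insert_unique(kinds, kind or UNKNOWN_OWNER_KIND)
--         _insert_unique(names, name or UNKNOWN_OWNER_NAME)
--     if len(kinds) == 1 and len(names) == 1:
--         return kinds[0], names[0]
--     shown = ", ".join(names[:3])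
--     if len(names) > 3:
--         shown = f"{shown}, ..."
--     return f"Multiple[{','.join(kinds)}]", shown
-- ===== Notes on version B (the rewrite author's own statement) =====
-- stated objective: alternative
-- what changed: B eliminates A's set-of-pairs plus three sorted()/set() stages: it makes one pass over the owners, maintaining two already-sorted duplicate-free axes (kinds, names) by ordered-unique insertion, and decides the single-owner case by 'one kind and one name'.
import Mathlib
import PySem

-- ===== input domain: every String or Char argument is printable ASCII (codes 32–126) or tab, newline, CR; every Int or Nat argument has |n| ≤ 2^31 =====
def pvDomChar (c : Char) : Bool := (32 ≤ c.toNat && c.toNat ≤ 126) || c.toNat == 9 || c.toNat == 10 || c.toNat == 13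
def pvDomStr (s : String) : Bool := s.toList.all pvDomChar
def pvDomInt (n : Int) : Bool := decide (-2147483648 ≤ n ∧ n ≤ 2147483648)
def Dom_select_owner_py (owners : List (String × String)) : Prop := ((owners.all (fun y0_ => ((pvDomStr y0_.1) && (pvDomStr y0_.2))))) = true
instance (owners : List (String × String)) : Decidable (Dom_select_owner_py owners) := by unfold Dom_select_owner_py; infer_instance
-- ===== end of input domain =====

-- B replaces A's set-of-(kind,name)-pairs plus three set()/sorted() stages by a single pass
-- over the owners that maintains two sorted duplicate-free axes by ordered-unique insertion;
-- objective: alternative (no set/sorted machinery at all).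

-- ===== PORT A =====
def select_owner_py (owners : List (String × String)) : String × String :=
  if owners = [] then ("Unknown", "Unknown")
  else
    let normalized := PySem.List.sorted2
      (PySem.Set.ofList (owners.map (fun p =>
        ((if p.1 = "" then "Unknown" else p.1), (if p.2 = "" then "Unknown" else p.2)))))
      (fun x => x.1) (fun x => x.2)
    if normalized.length = 1 then PySem.List.pyGetD normalized 0 ("", "")
    else
      let kinds := PySem.List.sorted (PySem.Set.ofList (normalized.map (fun p => p.1))) (fun x => x)
      let unique_names := PySem.List.sorted (PySem.Set.ofList (normalized.map (fun p => p.2))) (fun x => x)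
      let names := PySem.Str.join ", " (PySem.List.slice unique_names none (some 3))
      let names := if unique_names.length > 3 then names ++ ", ..." else names
      ("Multiple[" ++ PySem.Str.join "," kinds ++ "]", names)

-- ===== PORT B =====
-- _insert_unique: walk the sorted list; stop on an equal element, insert before a larger one, append at the end
def pvInsertUnique (x : String) : List String → List String
  | [] => [x]
  | v :: t => if x = v then v :: t else if x < v then x :: v :: t else v :: pvInsertUnique x t

def select_owner_py_alt (owners : List (String × String)) : String × String :=
  if owners = [] then ("Unknown", "Unknown")
  else
    -- single pass: both axes maintained together by ordered-unique insertion
    let kn := owners.foldl (fun acc p =>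
      (pvInsertUnique (if p.1 = "" then "Unknown" else p.1) acc.1,
       pvInsertUnique (if p.2 = "" then "Unknown" else p.2) acc.2)) ([], [])
    let kinds := kn.1
    let names := kn.2
    if kinds.length = 1 ∧ names.length = 1 then
      (PySem.List.pyGetD kinds 0 "", PySem.List.pyGetD names 0 "")
    else
      let shown := PySem.Str.join ", " (PySem.List.slice names none (some 3))
      let shown := if names.length > 3 then shown ++ ", ..." else shown
      ("Multiple[" ++ PySem.Str.join "," kinds ++ "]", shown)

-- ===== PRECONDITION & SPEC =====
def Spec_select_owner_py (owners : List (String × String)) (out : String × String) : Prop := out = select_owner_py_alt owners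
instance (owners : List (String × String)) (out : String × String) : Decidable (Spec_select_owner_py owners out) := by unfold Spec_select_owner_py; infer_instance

-- ===== CLAIM (what is proved, stated in full; the proofs are below) =====
def Claim_equal_select_owner_py : Prop := ∀ (owners : List (String × String)), Dom_select_owner_py owners → Spec_select_owner_py owners (select_owner_py owners)

-- ===== LEMMAS AND PROOFS =====

theorem pv_mem_insertUnique (x y : String) (l : List String) :
    y ∈ pvInsertUnique x l ↔ y = x ∨ y ∈ l := by
  induction l with
  | nil => simp [pvInsertUnique]
  | cons v t ih =>
    simp only [pvInsertUnique]
    split_ifs with h1 h2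
    · subst h1; simp [List.mem_cons]
    · simp [List.mem_cons]
    · simp only [List.mem_cons, ih]; tauto

theorem pv_pairwise_insertUnique (x : String) (l : List String)
    (h : l.Pairwise (· < ·)) : (pvInsertUnique x l).Pairwise (· < ·) := by
  induction l with
  | nil => simp [pvInsertUnique]
  | cons v t ih =>
    have hv : ∀ z ∈ t, v < z := (List.pairwise_cons.mp h).1
    have ht : t.Pairwise (· < ·) := (List.pairwise_cons.mp h).2
    simp only [pvInsertUnique]
    split_ifs with h1 h2
    · exact h
    · refine List.pairwise_cons.mpr ⟨?_, h⟩
      intro z hz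
      rcases List.mem_cons.mp hz with hz | hz
      · exact hz ▸ h2
      · exact lt_trans h2 (hv z hz)
    · have hvx : v < x := lt_of_le_of_ne (not_lt.mp h2) (Ne.symm h1)
      refine List.pairwise_cons.mpr ⟨?_, ih ht⟩
      intro z hz
      rcases (pv_mem_insertUnique x z t).mp hz with hz | hz
      · exact hz ▸ hvx
      · exact hv z hz

theorem pv_foldl_insertUnique_pairwise (l : List String) (acc : List String)
    (h : acc.Pairwise (· < ·)) :
    (l.foldl (fun a x => pvInsertUnique x a) acc).Pairwise (· < ·) := by
  induction l generalizing acc with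
  | nil => exact h
  | cons x t ih => exact ih _ (pv_pairwise_insertUnique x acc h)

theorem pv_mem_foldl_insertUnique (l : List String) (acc : List String) (y : String) :
    y ∈ l.foldl (fun a x => pvInsertUnique x a) acc ↔ y ∈ acc ∨ y ∈ l := by
  induction l generalizing acc with
  | nil => simp
  | cons x t ih =>
    simp only [List.foldl_cons, ih, pv_mem_insertUnique, List.mem_cons]
    tauto

-- the ordered-insertion fold over f-projections IS sorted(set(map f owners))
theorem pv_fold_eq_sorted (owners : List (String × String)) (f : String × String → String) :
    PySem.List.sorted (PySem.Set.ofList (owners.map f)) (fun x => x)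
      = (owners.map f).foldl (fun a x => pvInsertUnique x a) [] := by
  set K := (owners.map f).foldl (fun a x => pvInsertUnique x a) [] with hK
  have hpw : K.Pairwise (· < ·) := pv_foldl_insertUnique_pairwise _ _ (by simp)
  have hnd : K.Nodup := hpw.nodup
  have hperm : K.Perm (PySem.Set.ofList (owners.map f)) := by
    refine (List.perm_ext_iff_of_nodup hnd (PySem.Set.nodup_ofList _)).mpr ?_
    intro a
    rw [PySem.Set.mem_ofList, hK, pv_mem_foldl_insertUnique]
    simp
  exact PySem.List.sorted_eq_of_perm_of_pairwise_lt _ _ _ hperm hpw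

-- the paired fold splits into two independent folds
theorem pv_fold_pair (l : List (String × String)) (fk fn : String × String → String)
    (a b : List String) :
    l.foldl (fun acc p => (pvInsertUnique (fk p) acc.1, pvInsertUnique (fn p) acc.2)) (a, b)
      = (l.foldl (fun acc p => pvInsertUnique (fk p) acc) a,
         l.foldl (fun acc p => pvInsertUnique (fn p) acc) b) := by
  induction l generalizing a b with
  | nil => rfl
  | cons x t ih => simpa using ih _ _

-- a nodup list, nonempty, all of whose members equal a, is [a]
theorem pv_nodup_const_eq_singleton {α : Type} {s : List α} {a : α}
    (hn : s.Nodup) (hne : s ≠ []) (h : ∀ x ∈ s, x = a) : s = [a] := by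
  match s, hn with
  | [], _ => exact absurd rfl hne
  | x :: t, hn =>
    have hx : x = a := h x (by simp)
    have ht : t = [] := by
      cases t with
      | nil => rfl
      | cons y u =>
        have hy : y = a := h y (by simp)
        have hnx := (List.nodup_cons.mp hn).1
        simp at hnx
        exact absurd (hx.trans hy.symm) hnx.1
    simp [hx, ht]

-- set(l).length = 1 ↔ l is a nonempty constant list
theorem pv_ofList_length_one_iff {α : Type} [BEq α] [LawfulBEq α] (l : List α) (hne : l ≠ []) :
    (PySem.Set.ofList l).length = 1 ↔ ∃ a, ∀ x ∈ l, x = a := by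
  constructor
  · intro h
    obtain ⟨a, ha⟩ : ∃ a, PySem.Set.ofList l = [a] := by
      match hl : PySem.Set.ofList l, h with
      | [a], _ => exact ⟨a, rfl⟩
    refine ⟨a, fun x hx => ?_⟩
    have : x ∈ PySem.Set.ofList l := (PySem.Set.mem_ofList l x).mpr hx
    simpa [ha] using this
  · rintro ⟨a, ha⟩
    have hsne : PySem.Set.ofList l ≠ [] := by
      cases l with
      | nil => exact absurd rfl hne
      | cons x t =>
        intro hc
        have : x ∈ PySem.Set.ofList (x :: t) := (PySem.Set.mem_ofList _ x).mpr (by simp)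
        simp [hc] at this
    have := pv_nodup_const_eq_singleton (PySem.Set.nodup_ofList l) hsne
      (fun x hx => ha x ((PySem.Set.mem_ofList l x).mp hx))
    simp [this]

-- two deduped lists with the same members have the same sort
theorem pv_sorted_ofList_eq {α : Type} [BEq α] [LawfulBEq α] [LinearOrder α]
    {l m : List α} (h : ∀ x, x ∈ l ↔ x ∈ m) :
    PySem.List.sorted (PySem.Set.ofList l) (fun x => x)
      = PySem.List.sorted (PySem.Set.ofList m) (fun x => x) := by
  refine PySem.List.sorted_eq_sorted_of_perm _ _ _ (fun a b hab => hab) ?_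
  refine (List.perm_ext_iff_of_nodup (PySem.Set.nodup_ofList l) (PySem.Set.nodup_ofList m)).mpr ?_
  intro a
  simp [PySem.Set.mem_ofList, h a]

-- set(l) is nonempty when l is
theorem pv_ofList_ne_nil {α : Type} [BEq α] [LawfulBEq α] {l : List α} (hne : l ≠ []) :
    PySem.Set.ofList l ≠ [] := by
  cases l with
  | nil => exact absurd rfl hne
  | cons x t =>
    intro hc
    have : x ∈ PySem.Set.ofList (x :: t) := (PySem.Set.mem_ofList _ x).mpr (by simp)
    simp [hc] at this

-- ===== VERDICT (by name: the statement is the Claim_ definition above) =====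
theorem select_owner_py_spec : Claim_equal_select_owner_py := by
  intro owners _
  unfold Spec_select_owner_py select_owner_py select_owner_py_alt
  by_cases hnil : owners = []
  · simp [hnil]
  simp only [hnil, if_false]
  have hmapne : ∀ {β : Type} (f : String × String → β), owners.map f ≠ [] := by
    cases owners with
    | nil => exact absurd rfl hnil
    | cons _ _ => intro β f; simp
  set np : String × String → String × String :=
    fun p => ((if p.1 = "" then "Unknown" else p.1), (if p.2 = "" then "Unknown" else p.2)) with hnp
  set fk : String × String → String := fun p => if p.1 = "" then "Unknown" else p.1 with hfk
  set fn : String × String → String := fun p => if p.2 = "" then "Unknown" else p.2 with hfn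
  -- B's paired single-pass fold = the two sorted deduped axes
  have hsplit : owners.foldl (fun acc p =>
        (pvInsertUnique (fk p) acc.1, pvInsertUnique (fn p) acc.2)) ([], [])
      = (PySem.List.sorted (PySem.Set.ofList (owners.map fk)) (fun x => x),
         PySem.List.sorted (PySem.Set.ofList (owners.map fn)) (fun x => x)) := by
    rw [pv_fold_pair, pv_fold_eq_sorted, pv_fold_eq_sorted, List.foldl_map, List.foldl_map]
  rw [hsplit]
  set P : List (String × String) := PySem.Set.ofList (owners.map np) with hPdef
  set normalized := PySem.List.sorted2 P (fun x => x.1) (fun x => x.2) with hNdef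
  have hperm : normalized.Perm P := PySem.List.sorted2_perm _ _ _ _
  have hmk : ∀ x, x ∈ normalized.map (fun p => p.1) ↔ x ∈ owners.map fk := by
    intro x
    constructor
    · intro hx
      obtain ⟨p, hp, hpx⟩ := List.mem_map.mp hx
      have : p ∈ owners.map np := (PySem.Set.mem_ofList _ p).mp (hperm.mem_iff.mp hp)
      obtain ⟨q, hq, hqp⟩ := List.mem_map.mp this
      exact List.mem_map.mpr ⟨q, hq, by rw [← hqp] at hpx; exact hpx⟩
    · intro hx
      obtain ⟨q, hq, hqx⟩ := List.mem_map.mp hx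
      refine List.mem_map.mpr ⟨np q, ?_, hqx⟩
      exact hperm.mem_iff.mpr ((PySem.Set.mem_ofList _ _).mpr (List.mem_map.mpr ⟨q, hq, rfl⟩))
  have hmn : ∀ x, x ∈ normalized.map (fun p => p.2) ↔ x ∈ owners.map fn := by
    intro x
    constructor
    · intro hx
      obtain ⟨p, hp, hpx⟩ := List.mem_map.mp hx
      have : p ∈ owners.map np := (PySem.Set.mem_ofList _ p).mp (hperm.mem_iff.mp hp)
      obtain ⟨q, hq, hqp⟩ := List.mem_map.mp this
      exact List.mem_map.mpr ⟨q, hq, by rw [← hqp] at hpx; exact hpx⟩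
    · intro hx
      obtain ⟨q, hq, hqx⟩ := List.mem_map.mp hx
      refine List.mem_map.mpr ⟨np q, ?_, hqx⟩
      exact hperm.mem_iff.mpr ((PySem.Set.mem_ofList _ _).mpr (List.mem_map.mpr ⟨q, hq, rfl⟩))
  have hkeq : PySem.List.sorted (PySem.Set.ofList (normalized.map (fun p => p.1))) (fun x => x)
      = PySem.List.sorted (PySem.Set.ofList (owners.map fk)) (fun x => x) :=
    pv_sorted_ofList_eq hmk
  have hneq : PySem.List.sorted (PySem.Set.ofList (normalized.map (fun p => p.2))) (fun x => x)
      = PySem.List.sorted (PySem.Set.ofList (owners.map fn)) (fun x => x) :=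
    pv_sorted_ofList_eq hmn
  have hiff : normalized.length = 1 ↔
      ((PySem.List.sorted (PySem.Set.ofList (owners.map fk)) (fun x => x)).length = 1
        ∧ (PySem.List.sorted (PySem.Set.ofList (owners.map fn)) (fun x => x)).length = 1) := by
    rw [hperm.length_eq, PySem.List.length_sorted, PySem.List.length_sorted]
    rw [pv_ofList_length_one_iff _ (hmapne np), pv_ofList_length_one_iff _ (hmapne fk),
        pv_ofList_length_one_iff _ (hmapne fn)]
    constructor
    · rintro ⟨a, ha⟩
      refine ⟨⟨a.1, ?_⟩, ⟨a.2, ?_⟩⟩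
      · intro x hx
        obtain ⟨q, hq, hqx⟩ := List.mem_map.mp hx
        have := ha (np q) (List.mem_map.mpr ⟨q, hq, rfl⟩)
        rw [← hqx, ← this]
      · intro x hx
        obtain ⟨q, hq, hqx⟩ := List.mem_map.mp hx
        have := ha (np q) (List.mem_map.mpr ⟨q, hq, rfl⟩)
        rw [← hqx, ← this]
    · rintro ⟨⟨k, hk⟩, ⟨n, hn⟩⟩
      refine ⟨(k, n), ?_⟩
      intro x hx
      obtain ⟨q, hq, hqx⟩ := List.mem_map.mp hx
      have h1 := hk (fk q) (List.mem_map.mpr ⟨q, hq, rfl⟩)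
      have h2 := hn (fn q) (List.mem_map.mpr ⟨q, hq, rfl⟩)
      rw [← hqx]
      exact Prod.ext h1 h2
  by_cases hlen : normalized.length = 1
  · rw [if_pos hlen, if_pos (hiff.mp hlen)]
    obtain ⟨a, ha⟩ : ∃ a, normalized = [a] := by
      match hl : normalized, hlen with
      | [a], _ => exact ⟨a, rfl⟩
    have hall : ∀ q ∈ owners, np q = a := by
      intro q hq
      have : np q ∈ normalized := hperm.mem_iff.mpr ((PySem.Set.mem_ofList _ _).mpr (List.mem_map.mpr ⟨q, hq, rfl⟩))
      simpa [ha] using this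
    have hkone : PySem.Set.ofList (owners.map fk) = [a.1] := by
      refine pv_nodup_const_eq_singleton (PySem.Set.nodup_ofList _) (pv_ofList_ne_nil (hmapne fk)) ?_
      intro x hx
      obtain ⟨q, hq, hqx⟩ := List.mem_map.mp ((PySem.Set.mem_ofList _ x).mp hx)
      rw [← hqx]; rw [show fk q = (np q).1 from rfl, hall q hq]
    have hnone : PySem.Set.ofList (owners.map fn) = [a.2] := by
      refine pv_nodup_const_eq_singleton (PySem.Set.nodup_ofList _) (pv_ofList_ne_nil (hmapne fn)) ?_
      intro x hx
      obtain ⟨q, hq, hqx⟩ := List.mem_map.mp ((PySem.Set.mem_ofList _ x).mp hx)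
      rw [← hqx]; rw [show fn q = (np q).2 from rfl, hall q hq]
    have hks : PySem.List.sorted (PySem.Set.ofList (owners.map fk)) (fun x => x) = [a.1] := by
      rw [hkone]; exact List.perm_singleton.mp (PySem.List.sorted_perm _ _ _)
    have hns : PySem.List.sorted (PySem.Set.ofList (owners.map fn)) (fun x => x) = [a.2] := by
      rw [hnone]; exact List.perm_singleton.mp (PySem.List.sorted_perm _ _ _)
    show PySem.List.pyGetD normalized 0 ("", "") = _
    rw [ha, hks, hns]
    simp [PySem.List.pyGetD, PySem.List.pyGet?, PySem.List.pyIdx?]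
  · have hnot : ¬ ((PySem.List.sorted (PySem.Set.ofList (owners.map fk)) (fun x => x)).length = 1
        ∧ (PySem.List.sorted (PySem.Set.ofList (owners.map fn)) (fun x => x)).length = 1) :=
      fun h => hlen (hiff.mpr h)
    rw [if_neg hlen, if_neg hnot]
    rw [hkeq, hneq]
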